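-- pv_equiv track=rewrite | github.com/Aurdeegz/Zap70-Itk-Inhibitor-Profiling | proteomics/functions.py | duplicate_flanks
-- ===== SOURCE A (Python) =====
-- def duplicate_flanks(a_row,
--                      flank_locs,   # list of indices for the places with flanking sequences
--                      ):
--     """
--     This function takes the n-columns defining flanking sequences in a row and returns new rows where
--     all the values are duplicated but contain a single flanking sequence. Builds new lists iteratively.
--
--     Ex input: [Zap70, S491Y492Y493, KALGADDSYYTARSA , ALGADDSYYTARSAG, LGADDSYYTARSAGK]
--     Ex output: [[Zap70, S491Y492Y493, KALGADDSYYTARSA] ,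
--                 [Zap70, S491Y492Y493, ALGADDSYYTARSAG] ,
--                 [Zap70, S491Y492Y493, LGADDSYYTARSAGK] ]
--     """
--     flank_num = len(flank_locs)
--     new_rows = [[] for _ in range(flank_num)] # Make the new rows
--     flanks = []
--     f_ind = -1
--     seen = False
--     for i in range(len(a_row)):               # loop over the size of the row
--         if i not in flank_locs:               # If this is not a flank
--             for j in range(flank_num):
--                 new_rows[j].append(a_row[i])  # Add this info to each sublist
--         elif i in flank_locs:                 # If you hit a flank index
--             flanks.append(a_row[i])           # Add the flank to the flanks list
--             if not seen:                      # if it's new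
--                 for j in range(flank_num):    # Then add a placeholder
--                     new_rows[j].append("Flankity Flank Flank")
--                 seen = True                   # and mark as seen
--             if f_ind == -1:                   # and update the flank index
--                 f_ind = i
--     for i in range(flank_num):
--         new_rows[i][f_ind] = flanks[i]        # Then add the flanks back in
--     return new_rows
-- ===== SOURCE B (Python) =====
-- def duplicate_flanks(a_row,
--                      flank_locs,   # list of indices for the places with flanking sequences
--                      ):
--     # Simpler per-row construction: collect the flank values once, then build each
--     # output row independently, placing its flank value at the first flank column.
--     flanks = [a_row[i] for i in range(len(a_row)) if i in flank_locs]
--     new_rows = []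
--     for j in range(len(flank_locs)):
--         val = flanks[j]
--         row = []
--         placed = False
--         for i in range(len(a_row)):
--             if i in flank_locs:
--                 if not placed:
--                     row.append(val)
--                     placed = True
--             else:
--                 row.append(a_row[i])
--         new_rows.append(row)
--     return new_rows
-- ===== Notes on version B (the rewrite author's own statement) =====
-- stated objective: simpler
-- what changed: B drops A's parallel placeholder-row construction and final patch loop: it collects the flank values once, then builds each output row independently, placing that row's flank value directly at the first flank column.
import Mathlib
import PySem

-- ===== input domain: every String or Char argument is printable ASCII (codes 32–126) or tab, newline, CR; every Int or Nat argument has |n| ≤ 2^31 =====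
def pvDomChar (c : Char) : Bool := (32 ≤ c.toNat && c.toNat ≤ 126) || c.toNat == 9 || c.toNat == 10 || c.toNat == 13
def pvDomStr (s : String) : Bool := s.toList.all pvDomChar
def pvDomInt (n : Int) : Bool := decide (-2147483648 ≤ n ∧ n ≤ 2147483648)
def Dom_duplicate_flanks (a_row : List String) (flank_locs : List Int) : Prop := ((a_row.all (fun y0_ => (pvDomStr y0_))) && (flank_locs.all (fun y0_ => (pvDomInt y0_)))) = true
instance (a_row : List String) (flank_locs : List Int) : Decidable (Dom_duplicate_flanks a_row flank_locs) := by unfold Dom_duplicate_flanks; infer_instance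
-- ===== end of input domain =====

-- B replaces A's parallel placeholder rows + patch loop by independent per-row construction (simpler decomposition, same cost).


-- ===== PORT A =====
-- shared primitive: Python's `i in flank_locs` (i : int loop index)
def dfMem (flank_locs : List Int) (i : Nat) : Bool := flank_locs.contains (i : Int)

-- one iteration of A's main loop; state = (new_rows, flanks, f_ind, seen)
def dfStepA (a_row : List String) (flank_locs : List Int)
    (st : List (List String) × List String × Int × Bool) (i : Nat) :
    List (List String) × List String × Int × Bool :=
  let (new_rows, flanks, f_ind, seen) := st
  if dfMem flank_locs i = false then
    (new_rows.map (fun r => r ++ [a_row.getD i ""]), flanks, f_ind, seen)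
  else
    let flanks' := flanks ++ [a_row.getD i ""]
    let (new_rows', seen') :=
      if seen = false then (new_rows.map (fun r => r ++ ["Flankity Flank Flank"]), true)
      else (new_rows, seen)
    let f_ind' := if f_ind = -1 then (i : Int) else f_ind
    (new_rows', flanks', f_ind', seen')

def duplicate_flanks (a_row : List String) (flank_locs : List Int) : List (List String) :=
  let flank_num := flank_locs.length
  let init : List (List String) := (List.range flank_num).map (fun _ => [])
  let st := (List.range a_row.length).foldl (dfStepA a_row flank_locs) (init, [], -1, false)
  -- final patch loop `new_rows[i][f_ind] = flanks[i]`; inside Pre_ f_ind ≥ 0 and flanks has flank_num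
  -- entries (outside Pre_ the Python raises IndexError, which Pre_ excludes)
  (List.range flank_num).foldl
    (fun rows i => rows.set i ((rows.getD i []).set st.2.2.1.toNat (st.2.1.getD i "")))
    st.1

-- ===== PORT B =====
-- one iteration of B's inner row-building loop; state = (row, placed)
def dfStepB (a_row : List String) (flank_locs : List Int) (val : String)
    (st : List String × Bool) (i : Nat) : List String × Bool :=
  let (row, placed) := st
  if dfMem flank_locs i then
    if placed = false then (row ++ [val], true) else (row, placed)
  else (row ++ [a_row.getD i ""], placed)

def duplicate_flanks_alt (a_row : List String) (flank_locs : List Int) : List (List String) :=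
  let flanks := ((List.range a_row.length).filter (fun i => dfMem flank_locs i)).map
    (fun i => a_row.getD i "")
  (List.range flank_locs.length).map (fun j =>
    ((List.range a_row.length).foldl (dfStepB a_row flank_locs (flanks.getD j "")) ([], false)).1)

-- ===== PRECONDITION & SPEC =====
-- Pre_ excludes exactly the inputs where Python A raises IndexError (duplicate or out-of-range
-- flank indices leave fewer collected flanks than rows); Python B raises there as well.
def Pre_duplicate_flanks (a_row : List String) (flank_locs : List Int) : Prop :=
  flank_locs.Nodup ∧ ∀ v ∈ flank_locs, 0 ≤ v ∧ v < (a_row.length : Int)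
instance (a_row : List String) (flank_locs : List Int) : Decidable (Pre_duplicate_flanks a_row flank_locs) := by unfold Pre_duplicate_flanks; infer_instance

def pvWitness_duplicate_flanks : List String × List Int :=
  (["Zap70", "S491", "KALG", "ALGA", "LGAD"], [2, 3, 4])

def Spec_duplicate_flanks (a_row : List String) (flank_locs : List Int) (out : List (List String)) : Prop := out = duplicate_flanks_alt a_row flank_locs
instance (a_row : List String) (flank_locs : List Int) (out : List (List String)) : Decidable (Spec_duplicate_flanks a_row flank_locs out) := by unfold Spec_duplicate_flanks; infer_instance

-- ===== CLAIM (what is proved, stated in full; the proofs are below) =====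
def Claim_equal_duplicate_flanks : Prop := ∀ (a_row : List String) (flank_locs : List Int), Dom_duplicate_flanks a_row flank_locs → Pre_duplicate_flanks a_row flank_locs → Spec_duplicate_flanks a_row flank_locs (duplicate_flanks a_row flank_locs)

-- ===== LEMMAS AND PROOFS =====

-- single-row shadow of A's main loop: what each of the m identical rows looks like
def dfStepR (a_row : List String) (flank_locs : List Int)
    (st : List String × List String × Int × Bool) (i : Nat) :
    List String × List String × Int × Bool :=
  let (r, flanks, f_ind, seen) := st
  if dfMem flank_locs i = false then (r ++ [a_row.getD i ""], flanks, f_ind, seen)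
  else
    let flanks' := flanks ++ [a_row.getD i ""]
    let (r', seen') := if seen = false then (r ++ ["Flankity Flank Flank"], true) else (r, seen)
    let f_ind' := if f_ind = -1 then (i : Int) else f_ind
    (r', flanks', f_ind', seen')

-- A's fold keeps all m rows identical: it is the single-row fold, replicated
theorem dfA_replicate (a_row : List String) (flank_locs : List Int) (l : List Nat)
    (m : Nat) (r fl : List String) (fi : Int) (seen : Bool) :
    l.foldl (dfStepA a_row flank_locs) (List.replicate m r, fl, fi, seen)
      = (List.replicate m (l.foldl (dfStepR a_row flank_locs) (r, fl, fi, seen)).1,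
         (l.foldl (dfStepR a_row flank_locs) (r, fl, fi, seen)).2) := by
  induction l generalizing m r fl fi seen with
  | nil => rfl
  | cons i l ih =>
      simp only [List.foldl_cons, dfStepA, dfStepR]
      by_cases h : dfMem flank_locs i = false
      · simp [h, ih, List.map_replicate]
      · cases seen <;> simp [h, ih, List.map_replicate]

-- the flanks accumulator is the filtered-and-fetched index list
theorem dfR_flanks (a_row : List String) (flank_locs : List Int) (l : List Nat)
    (r fl : List String) (fi : Int) (seen : Bool) :
    (l.foldl (dfStepR a_row flank_locs) (r, fl, fi, seen)).2.1
      = fl ++ (l.filter (fun i => dfMem flank_locs i)).map (fun i => a_row.getD i "") := by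
  induction l generalizing r fl fi seen with
  | nil => simp
  | cons i l ih =>
      simp only [List.foldl_cons, dfStepR, List.filter_cons]
      by_cases h : dfMem flank_locs i = false
      · simp [h, ih]
      · cases seen <;> simp [h, ih]

-- seen becomes true exactly when some processed index is a flank
theorem dfR_seen (a_row : List String) (flank_locs : List Int) (l : List Nat)
    (r fl : List String) (fi : Int) (seen : Bool) :
    (l.foldl (dfStepR a_row flank_locs) (r, fl, fi, seen)).2.2.2
      = (seen || l.any (fun i => dfMem flank_locs i)) := by
  induction l generalizing r fl fi seen with
  | nil => simp
  | cons i l ih =>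
      simp only [List.foldl_cons, dfStepR, List.any_cons]
      by_cases h : dfMem flank_locs i = false
      · simp [h, ih]
      · cases seen <;> simp [h, ih]

-- setting / reading a list at the length of its prefix
theorem set_at_len {α : Type} (pre : List α) (b x : α) (post : List α) :
    (pre ++ b :: post).set pre.length x = pre ++ x :: post := by
  induction pre with
  | nil => rfl
  | cons a pre ih => simp

theorem getD_at_len {α : Type} (pre : List α) (b : α) (post : List α) (d : α) :
    (pre ++ b :: post).getD pre.length d = b := by
  induction pre with
  | nil => rfl
  | cons a pre ih => simp

-- relation between the single-row A state and B's row state (val fixed)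
def dfRel (val : String) (stR : List String × List String × Int × Bool)
    (stB : List String × Bool) (s : Nat) : Prop :=
  stB.2 = stR.2.2.2 ∧
  (if stR.2.2.2 then
      ∃ pre post, stR.1 = pre ++ "Flankity Flank Flank" :: post ∧
        stB.1 = pre ++ val :: post ∧ stR.2.2.1 = (pre.length : Int)
    else stB.1 = stR.1 ∧ stR.2.2.1 = -1 ∧ stR.1.length = s)

theorem dfRel_step (a_row : List String) (flank_locs : List Int) (val : String)
    (stR : List String × List String × Int × Bool) (stB : List String × Bool) (s : Nat)
    (h : dfRel val stR stB s) :
    dfRel val (dfStepR a_row flank_locs stR s) (dfStepB a_row flank_locs val stB s) (s + 1) := by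
  obtain ⟨r, fl, fi, seen⟩ := stR
  obtain ⟨rowB, placed⟩ := stB
  obtain ⟨hp, hrest⟩ := h
  dsimp only at hp hrest
  subst hp
  simp only [dfStepR, dfStepB]
  by_cases hm : dfMem flank_locs s = false
  · simp only [hm, if_false, if_true, Bool.false_eq_true]
    cases placed with
    | false =>
        simp only [if_false, Bool.false_eq_true] at hrest
        obtain ⟨h1, h2, h3⟩ := hrest
        refine ⟨rfl, ?_⟩
        simp only [if_false, Bool.false_eq_true]
        exact ⟨by simp [h1], h2, by simp [h3]⟩
    | true =>
        simp only [if_true] at hrest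
        obtain ⟨pre, post, h1, h2, h3⟩ := hrest
        refine ⟨rfl, ?_⟩
        simp only [if_true]
        exact ⟨pre, post ++ [a_row.getD s ""], by simp [h1], by simp [h2], h3⟩
  · replace hm : dfMem flank_locs s = true := eq_true_of_ne_false hm
    simp only [hm, if_true]
    cases placed with
    | false =>
        simp only [if_false, Bool.false_eq_true] at hrest
        obtain ⟨h1, h2, h3⟩ := hrest
        refine ⟨rfl, ?_⟩
        simp only [if_true]
        refine ⟨r, [], by simp, by simp [h1], ?_⟩
        simp [h2, ← h3]
    | true =>
        simp only [if_true] at hrest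
        obtain ⟨pre, post, h1, h2, h3⟩ := hrest
        refine ⟨rfl, ?_⟩
        have hfi : fi ≠ -1 := by rw [h3]; simp
        exact ⟨pre, post, h1, h2, by simp [h3]⟩

theorem dfRel_fold (a_row : List String) (flank_locs : List Int) (val : String)
    (t s : Nat) (stR : List String × List String × Int × Bool) (stB : List String × Bool)
    (h : dfRel val stR stB s) :
    dfRel val ((List.range' s t).foldl (dfStepR a_row flank_locs) stR)
      ((List.range' s t).foldl (dfStepB a_row flank_locs val) stB) (s + t) := by
  induction t generalizing s stR stB with
  | zero => simpa using h
  | succ t ih =>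
      rw [List.range'_succ]
      simp only [List.foldl_cons]
      have := ih (s + 1) _ _ (dfRel_step a_row flank_locs val stR stB s h)
      rw [show s + (t + 1) = s + 1 + t from by omega]
      exact this

-- the patch loop on m identical rows is a map
theorem patch_fold (r : List String) (p : Nat) (flanks : List String)
    (m : Nat) (pref : List (List String)) :
    (List.range' pref.length m).foldl
        (fun rows i => rows.set i ((rows.getD i []).set p (flanks.getD i "")))
        (pref ++ List.replicate m r)
      = pref ++ (List.range' pref.length m).map (fun i => r.set p (flanks.getD i "")) := by
  induction m generalizing pref with
  | zero => simp
  | succ m ih =>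
      rw [List.range'_succ]
      simp only [List.foldl_cons, List.map_cons, List.replicate_succ]
      have hget : (pref ++ r :: List.replicate m r).getD pref.length [] = r :=
        getD_at_len pref r _ []
      have hset : (pref ++ r :: List.replicate m r).set pref.length (r.set p (flanks.getD pref.length ""))
          = pref ++ (r.set p (flanks.getD pref.length "")) :: List.replicate m r :=
        set_at_len pref r _ _
      rw [hget, hset]
      have := ih (pref ++ [r.set p (flanks.getD pref.length "")])
      simp only [List.append_assoc, List.length_append, List.length_cons, List.length_nil] at this ⊢
      simpa using this

theorem duplicate_flanks_spec : Claim_equal_duplicate_flanks := by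
  intro a_row flank_locs _ hpre
  unfold Spec_duplicate_flanks
  obtain ⟨hnd, hbd⟩ := hpre
  simp only [duplicate_flanks, duplicate_flanks_alt]
  have hinit : (List.range flank_locs.length).map (fun _ => ([] : List String))
      = List.replicate flank_locs.length ([] : List String) := by
    simp
  rw [hinit, dfA_replicate]
  set R := (List.range a_row.length).foldl (dfStepR a_row flank_locs) ([], [], -1, false) with hR
  have hfl : ((List.range a_row.length).filter (fun i => dfMem flank_locs i)).map
      (fun i => a_row.getD i "") = R.2.1 := by
    rw [hR, dfR_flanks]; simp
  cases hm : flank_locs.length with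
  | zero => simp
  | succ m' =>
    have hne : flank_locs ≠ [] := by
      intro h; rw [h] at hm; simp at hm
    obtain ⟨v, hv⟩ := List.exists_mem_of_ne_nil _ hne
    obtain ⟨hv0, hvlt⟩ := hbd v hv
    have hmem : dfMem flank_locs v.toNat = true := by
      simp only [dfMem, Int.toNat_of_nonneg hv0]
      simpa using hv
    have hseen : R.2.2.2 = true := by
      rw [hR, dfR_seen]
      simp only [Bool.false_or, List.any_eq_true]
      exact ⟨v.toNat, by simp [List.mem_range]; omega, hmem⟩
    have hrow : ∀ val : String,
        ((List.range a_row.length).foldl (dfStepB a_row flank_locs val) ([], false)).1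
          = R.1.set R.2.2.1.toNat val := by
      intro val
      have h0 : dfRel val ([], [], -1, false) ([], false) 0 := by
        unfold dfRel; simp
      have h := dfRel_fold a_row flank_locs val a_row.length 0 _ _ h0
      rw [← List.range_eq_range'] at h
      rw [← hR] at h
      unfold dfRel at h
      obtain ⟨hp, hrest⟩ := h
      rw [hseen] at hrest
      simp only [if_true] at hrest
      obtain ⟨pre, post, h1, h2, h3⟩ := hrest
      rw [h2, h1, h3]
      simp
    have hpatch := patch_fold R.1 R.2.2.1.toNat R.2.1 flank_locs.length ([] : List (List String))
    simp only [List.length_nil, List.nil_append] at hpatch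
    rw [← List.range_eq_range'] at hpatch
    rw [hm] at hpatch
    rw [hfl]
    dsimp only
    rw [hpatch]
    exact (List.map_congr_left (fun j _ => (hrow (R.2.1.getD j "")).symm))
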